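-- pv_equiv track=rewrite | github.com/Luvs2Slack/lab-6 | is_golden_number.py | is_golden_number
-- ===== SOURCE A (Python) =====
-- def is_golden_number(n):
-- #     # function implementation ...
--      A = 0
--      while n > 0:
--           if n * A == 1000:
--                boolean = True
--                break
--           A = A + 1
--           n = n - 1
--      if n == 0:
--           boolean = False
--
--
--
--      return boolean
-- ===== SOURCE B (Python) =====
-- def is_golden_number(n):
--     # n is golden iff n = k + 1000//k for some divisor k of 1000;
--     # checking divisors k with k*k <= 1000 covers every factor pair.
--     k = 1
--     while k * k <= 1000:
--         if 1000 % k == 0 and n == k + 1000 // k: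
--             return True
--         k = k + 1
--     return False
-- ===== Notes on version B (the rewrite author's own statement) =====
-- stated objective: faster
-- what changed: Replaces A's linear countdown scan over all k in [0,n] by a constant-bounded scan over the divisors k of 1000 with k*k <= 1000, testing n == k + 1000//k.
import Mathlib
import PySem

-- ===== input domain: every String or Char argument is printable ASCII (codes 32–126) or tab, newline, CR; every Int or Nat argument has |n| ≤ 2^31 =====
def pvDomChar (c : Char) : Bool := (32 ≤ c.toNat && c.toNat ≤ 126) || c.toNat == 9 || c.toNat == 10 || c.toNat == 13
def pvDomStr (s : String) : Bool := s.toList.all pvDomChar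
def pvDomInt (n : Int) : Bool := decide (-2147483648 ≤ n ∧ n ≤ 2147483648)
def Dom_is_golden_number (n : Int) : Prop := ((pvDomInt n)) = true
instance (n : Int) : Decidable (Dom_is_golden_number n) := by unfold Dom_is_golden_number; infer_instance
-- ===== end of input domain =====

-- B replaces A's O(n) countdown scan by a constant-bounded scan over the divisors of 1000 (faster, asymptotic).

-- ===== PORT A =====
-- A's while loop: A starts at 0, n counts down; break (True) when n*A == 1000,
-- exit with n exhausted gives False (n < 0 at entry raises in Python: excluded by Pre_).
def goldenLoop (n A : Int) : Bool :=
  if n > 0 then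
    if n * A == 1000 then true
    else goldenLoop (n - 1) (A + 1)
  else false
termination_by n.toNat
decreasing_by omega

def is_golden_number (n : Int) : Bool := goldenLoop n 0

-- ===== PORT B =====
def altLoop (n k : Int) : Bool :=
  if h : k * k ≤ 1000 then
    if PySem.Int.mod 1000 k == 0 && n == k + PySem.Int.floordiv 1000 k then true
    else altLoop n (k + 1)
  else false
termination_by (1001 - k).toNat
decreasing_by
  have hk : k ≤ 31 := by nlinarith
  have hk' : -31 ≤ k := by nlinarith
  omega

def is_golden_number_alt (n : Int) : Bool := altLoop n 1

-- ===== PRECONDITION & SPEC =====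
-- Pre_ excludes n < 0, where Python A raises UnboundLocalError (the loop body never runs and the final equality test on n fails, leaving boolean unbound).
def Pre_is_golden_number (n : Int) : Prop := 0 ≤ n
instance (n : Int) : Decidable (Pre_is_golden_number n) := by unfold Pre_is_golden_number; infer_instance
def pvWitness_is_golden_number : Int := (65)

def Spec_is_golden_number (n : Int) (out : Bool) : Prop := out = is_golden_number_alt n
instance (n : Int) (out : Bool) : Decidable (Spec_is_golden_number n out) := by unfold Spec_is_golden_number; infer_instance

-- ===== CLAIM (what is proved, stated in full; the proofs are below) =====
def Claim_equal_is_golden_number : Prop := ∀ (n : Int), Dom_is_golden_number n → Pre_is_golden_number n → Spec_is_golden_number n (is_golden_number n)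

-- ===== LEMMAS AND PROOFS =====

-- B's loop, started at k = 1, reduces to an 8-way membership test.
theorem altLoop_one (n : Int) :
    altLoop n 1 = (n == 1001 || n == 502 || n == 254 || n == 205 || n == 133 ||
                   n == 110 || n == 70 || n == 65) := by
  simp [altLoop, PySem.Int.mod, PySem.Int.floordiv]
  simp [beq_eq_decide, Bool.or_assoc]

-- A's loop characterised: true iff some i < m hits (m - i) * (A + i) = 1000.
theorem goldenLoop_char (m : ℕ) : ∀ (A : Int),
    goldenLoop (m : Int) A = true ↔ ∃ i : ℕ, i < m ∧ ((m : Int) - i) * (A + i) = 1000 := by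
  induction m with
  | zero => intro A; simp [goldenLoop]
  | succ m ih =>
      intro A
      have hc : ((m + 1 : ℕ) : Int) - 1 = (m : Int) := by push_cast; ring
      rw [goldenLoop]
      simp only [show ((m + 1 : ℕ) : Int) > 0 by push_cast; omega, if_pos, hc]
      by_cases hhit : ((m + 1 : ℕ) : Int) * A = 1000
      · simp only [hhit, beq_self_eq_true, if_true, true_iff]
        exact ⟨0, by omega, by push_cast; simpa using hhit⟩
      · rw [if_neg (by simpa using hhit)]
        rw [ih (A + 1)]
        constructor
        · rintro ⟨j, hj, hjeq⟩
          exact ⟨j + 1, by omega, by push_cast at hjeq ⊢; linarith [hjeq]⟩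
        · rintro ⟨i, hi, hieq⟩
          match i with
          | 0 => exact absurd (by push_cast at hieq ⊢; linarith [hieq]) hhit
          | j + 1 => exact ⟨j, by omega, by push_cast at hieq ⊢; linarith [hieq]⟩

set_option maxRecDepth 10000 in
theorem goldenLoop_set (m : ℕ) :
    goldenLoop (m : Int) 0 = true ↔
      (m : Int) = 1001 ∨ (m : Int) = 502 ∨ (m : Int) = 254 ∨ (m : Int) = 205 ∨
      (m : Int) = 133 ∨ (m : Int) = 110 ∨ (m : Int) = 70 ∨ (m : Int) = 65 := by
  rw [goldenLoop_char]
  constructor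
  · rintro ⟨i, hi, heq⟩
    have hij : ((m - i : ℕ) : Int) * (i : Int) = 1000 := by
      push_cast [Nat.cast_sub (le_of_lt hi)] at heq ⊢; linarith [heq]
    have hnat : (m - i) * i = 1000 := by exact_mod_cast hij
    have hdvd : i ∣ 1000 := ⟨m - i, by rw [← hnat]; ring⟩
    have hmem : i ∈ Nat.divisors 1000 := Nat.mem_divisors.mpr ⟨hdvd, by norm_num⟩
    fin_cases hmem <;> omega
  · rintro (h | h | h | h | h | h | h | h)
    · exact ⟨1, by omega, by rw [h]; norm_num⟩
    · exact ⟨2, by omega, by rw [h]; norm_num⟩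
    · exact ⟨4, by omega, by rw [h]; norm_num⟩
    · exact ⟨5, by omega, by rw [h]; norm_num⟩
    · exact ⟨8, by omega, by rw [h]; norm_num⟩
    · exact ⟨10, by omega, by rw [h]; norm_num⟩
    · exact ⟨20, by omega, by rw [h]; norm_num⟩
    · exact ⟨25, by omega, by rw [h]; norm_num⟩

-- ===== VERDICT (by name: the statement is the Claim_ definition above) =====
theorem is_golden_number_spec : Claim_equal_is_golden_number := by
  intro n _ hpre
  unfold Pre_is_golden_number at hpre
  unfold Spec_is_golden_number is_golden_number is_golden_number_alt
  rw [altLoop_one]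
  have hn : ((n.toNat : Int)) = n := by omega
  rw [← hn, Bool.eq_iff_iff]
  simp only [Bool.or_eq_true, beq_iff_eq]
  have h := goldenLoop_set n.toNat
  tauto
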